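-- pv_equiv track=rewrite | github.com/swagasoft/dsa_master_class | cubic_space.py | cubic_space_example
-- ===== SOURCE A (Python) =====
-- def cubic_space_example(n):
--     # O(n^3) time,
--     result = []
--     for i in range(n):
--         matrix = []
--         for j in range(n):
--             row = []
--             for k in range(n):
--                 row.append(i * j * k)
--             matrix.append(row)
--         result.append(matrix)# O(n ^3)
--     return result
-- ===== SOURCE B (Python) =====
-- def cubic_space_example(n):
--     base = [[j * k for k in range(n)] for j in range(n)]
--     return [[[i * v for v in row] for row in base] for i in range(n)]
-- ===== Notes on version B (the rewrite author's own statement) =====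
-- stated objective: alternative
-- what changed: B builds a shared j*k base table once and produces each slab by scaling that table by i (build-table-then-transform via comprehensions), instead of A's three nested append loops recomputing i*j*k in the innermost loop.
import Mathlib
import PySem

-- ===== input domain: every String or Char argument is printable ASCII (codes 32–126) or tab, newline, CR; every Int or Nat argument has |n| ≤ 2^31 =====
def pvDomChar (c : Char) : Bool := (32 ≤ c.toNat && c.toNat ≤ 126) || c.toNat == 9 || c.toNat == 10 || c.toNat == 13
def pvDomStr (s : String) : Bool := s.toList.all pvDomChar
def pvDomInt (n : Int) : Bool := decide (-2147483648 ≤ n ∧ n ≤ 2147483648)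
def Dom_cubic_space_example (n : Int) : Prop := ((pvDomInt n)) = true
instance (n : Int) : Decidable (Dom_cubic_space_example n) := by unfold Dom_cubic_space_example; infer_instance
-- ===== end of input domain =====

-- B builds a shared j*k base table once and scales it per i (build-then-transform) instead of three naive append loops; alternative decomposition, same O(n^3) cost.


-- ===== PORT A =====
-- Port of A: three nested loops appending i*j*k.
def cubic_space_example (n : Int) : List (List (List Int)) :=
  (PySem.List.pyRange 0 n 1).foldl (fun result i =>
    result ++ [(PySem.List.pyRange 0 n 1).foldl (fun matrix j =>
      matrix ++ [(PySem.List.pyRange 0 n 1).foldl (fun row k =>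
        row ++ [i * j * k]) []]) []]) []

-- ===== PORT B =====
-- Port of B: build the j*k base table once, then scale it by i for each slab.
def cubic_space_example_alt (n : Int) : List (List (List Int)) :=
  let base := (PySem.List.pyRange 0 n 1).map (fun j =>
    (PySem.List.pyRange 0 n 1).map (fun k => j * k))
  (PySem.List.pyRange 0 n 1).map (fun i =>
    base.map (fun row => row.map (fun v => i * v)))

-- ===== PRECONDITION & SPEC =====
def Spec_cubic_space_example (n : Int) (out : List (List (List Int))) : Prop := out = cubic_space_example_alt n
instance (n : Int) (out : List (List (List Int))) : Decidable (Spec_cubic_space_example n out) := by unfold Spec_cubic_space_example; infer_instance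

-- ===== CLAIM (what is proved, stated in full; the proofs are below) =====
def Claim_equal_cubic_space_example : Prop := ∀ (n : Int), Dom_cubic_space_example n → Spec_cubic_space_example n (cubic_space_example n)

-- ===== LEMMAS AND PROOFS =====

-- ===== VERDICT (by name: the statement is the Claim_ definition above) =====
-- append-accumulator loop = map
theorem foldl_append_singleton_eq_map {α β : Type} (f : α → β) (l : List α) (acc : List β) :
    l.foldl (fun r x => r ++ [f x]) acc = acc ++ l.map f := by
  induction l generalizing acc with
  | nil => simp
  | cons x xs ih => simp [List.foldl, ih]

theorem cubic_space_example_spec : Claim_equal_cubic_space_example := by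
  intro n _
  unfold Spec_cubic_space_example cubic_space_example cubic_space_example_alt
  simp only [foldl_append_singleton_eq_map, List.nil_append, List.map_map]
  apply List.map_congr_left; intro i _
  apply List.map_congr_left; intro j _
  simp only [Function.comp, List.map_map]
  apply List.map_congr_left; intro k _
  simp [mul_assoc]
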